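-- pv_equiv track=rewrite | github.com/wmouwen/everybody-codes | events/2024/3/solution.py | calc_depths
-- ===== SOURCE A (Python) =====
-- def calc_depths(
--     grid: list[list[str]], directions: list[tuple[int, int]]
-- ) -> list[list[int]]:
--     depths = [[None if cell == '#' else 0 for cell in row] for row in grid]
--
--     depth = 0
--     triggered = True
--     while triggered:
--         depth += 1
--         triggered = False
--
--         for y in range(len(depths)):
--             for x in range(len(depths[y])):
--                 if depths[y][x] is not None:
--                     continue
--
--                 neighbors = [
--                     depths[y + dy][x + dx]
--                     for dx, dy in directions
--                     if 0 <= y + dy < len(depths) and 0 <= x + dx < len(depths[y + dy])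
--                 ]
--
--                 if any(
--                     neighbor is not None and neighbor != depth for neighbor in neighbors
--                 ) and all(
--                     neighbor is None or neighbor <= depth for neighbor in neighbors
--                 ):
--                     triggered = True
--                     depths[y][x] = depth
--
--     return depths
-- ===== SOURCE B (Python) =====
-- def calc_depths(
--     grid: list[list[str]], directions: list[tuple[int, int]]
-- ) -> list[list[int]]:
--     # depths kept in a dict keyed by coordinates; multi-source BFS from the
--     # zero cells, expanding one level per round along reversed directions.
--     depth_of = {}
--     frontier = []
--     for y, row in enumerate(grid):
--         for x, cell in enumerate(row):
--             if cell != '#':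
--                 depth_of[(y, x)] = 0
--                 frontier.append((y, x))
--
--     depth = 0
--     while frontier:
--         depth += 1
--         nxt = []
--         for y, x in frontier:
--             for dx, dy in directions:
--                 ny, nx = y - dy, x - dx
--                 if 0 <= ny < len(grid) and 0 <= nx < len(grid[ny]) and (ny, nx) not in depth_of:
--                     depth_of[(ny, nx)] = depth
--                     nxt.append((ny, nx))
--         frontier = nxt
--
--     return [[depth_of.get((y, x)) for x, _ in enumerate(row)] for y, row in enumerate(grid)]
-- ===== Notes on version B (the rewrite author's own statement) =====
-- stated objective: alternative
-- what changed: Replaced the repeated full-grid erosion scans (one scan of every cell per depth level until a pass changes nothing) by a multi-source BFS: depths live in a coordinate-keyed dict, the zero cells seed the frontier, each round expands the frontier one level along reversed directions touching each cell's incoming edges once, and the result grid is rebuilt from the dict at the end.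
import Mathlib
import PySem

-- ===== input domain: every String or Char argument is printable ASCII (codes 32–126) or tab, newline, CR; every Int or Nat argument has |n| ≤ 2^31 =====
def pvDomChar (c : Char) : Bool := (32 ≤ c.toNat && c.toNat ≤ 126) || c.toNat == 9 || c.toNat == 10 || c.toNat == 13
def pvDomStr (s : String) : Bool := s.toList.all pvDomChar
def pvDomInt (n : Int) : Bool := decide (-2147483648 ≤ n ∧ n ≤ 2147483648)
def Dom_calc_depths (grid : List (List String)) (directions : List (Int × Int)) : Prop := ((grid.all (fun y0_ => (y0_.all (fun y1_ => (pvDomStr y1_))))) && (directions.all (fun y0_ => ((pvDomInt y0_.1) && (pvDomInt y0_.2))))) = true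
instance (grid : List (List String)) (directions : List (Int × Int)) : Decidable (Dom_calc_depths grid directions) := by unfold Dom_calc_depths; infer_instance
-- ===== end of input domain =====

-- B replaces A's repeated full-grid erosion passes by a multi-source BFS whose depths are
-- kept in a coordinate-keyed dict and whose frontier advances one level per round
-- (objective: alternative algorithm, same return value).


-- ===== PORT A =====

-- A's first line: depths = [[None if cell == '#' else 0 ...]]
def pvInit (grid : List (List String)) : List (List (Option Int)) :=
  grid.map (fun row => row.map (fun cell => if cell = "#" then none else some (0 : Int)))

-- depths[y] (default [] out of range; all accesses in the port are in range)
def pvRow (D : List (List (Option Int))) (y : Nat) : List (Option Int) := D.getD y []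

-- depths[y][x] = v (in-place assignment)
def pvSet (D : List (List (Option Int))) (y x : Nat) (v : Option Int) : List (List (Option Int)) :=
  D.modify y (fun row => row.set x v)

-- number of None cells: the termination measure of A's while loop
def pvCountNone (D : List (List (Option Int))) : Nat :=
  (D.map (fun row => row.countP (fun v => v = none))).sum

-- the `neighbors` comprehension of A
def pvNbrs (D : List (List (Option Int))) (dirs : List (Int × Int)) (y x : Int) : List (Option Int) :=
  dirs.filterMap (fun d =>
    if 0 ≤ y + d.2 ∧ y + d.2 < (D.length : Int) ∧ 0 ≤ x + d.1 ∧ x + d.1 < ((pvRow D (y + d.2).toNat).length : Int)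
    then some ((pvRow D (y + d.2).toNat).getD (x + d.1).toNat none)
    else none)

-- A's loop body for one cell (y, x)
def pvStepA (dirs : List (Int × Int)) (depth : Int) (st : List (List (Option Int)) × Bool) (y x : Nat) :
    List (List (Option Int)) × Bool :=
  match (pvRow st.1 y).getD x none with
  | some _ => st
  | none =>
    let nb := pvNbrs st.1 dirs y x
    if (nb.any fun o => match o with | none => false | some v => v != depth) &&
       (nb.all fun o => match o with | none => true | some v => decide (v ≤ depth))
    then (pvSet st.1 y x (some depth), true)
    else st

-- one full scan of the grid (A's `for y ... for x ...` with `triggered`)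
def pvPassA (dirs : List (Int × Int)) (depth : Int) (D : List (List (Option Int))) :
    List (List (Option Int)) × Bool :=
  (List.range D.length).foldl (fun st y =>
    (List.range (pvRow st.1 y).length).foldl (fun st x => pvStepA dirs depth st y x) st)
    (D, false)

-- shape preservation / measure lemmas A's termination proof cites
def pvShape (D E : List (List (Option Int))) : Prop :=
  E.length = D.length ∧ ∀ i : Nat, (pvRow E i).length = (pvRow D i).length

lemma pvShape_refl (D : List (List (Option Int))) : pvShape D D := ⟨rfl, fun _ => rfl⟩

lemma pvRow_set (D : List (List (Option Int))) (y x : Nat) (v : Option Int) (i : Nat) :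
    pvRow (pvSet D y x v) i = if i = y then (pvRow D y).set x v else pvRow D i := by
  unfold pvRow pvSet
  rcases Nat.lt_or_ge y D.length with hy | hy
  · rcases Nat.lt_or_ge i D.length with hi | hi
    · rw [List.getD_eq_getElem _ _ (by simpa using hi), List.getElem_modify]
      by_cases h : i = y
      · subst h; rw [List.getD_eq_getElem _ _ hy]
      · rw [if_neg h, if_neg (Ne.symm h), List.getD_eq_getElem _ _ hi]
    · rw [List.getD_eq_default _ _ (by simpa using hi), List.getD_eq_default _ _ hi]
      split_ifs with h
      · omega
      · rfl
  · rw [List.modify_eq_self (by simpa using hy)]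
    split_ifs with h
    · subst h; rw [List.getD_eq_default _ _ hy]; simp
    · rfl

lemma pvShape_set (D E : List (List (Option Int))) (y x : Nat) (v : Option Int)
    (h : pvShape D E) : pvShape D (pvSet E y x v) := by
  refine ⟨?_, ?_⟩
  · rw [← h.1]; exact List.length_modify ..
  · intro i
    rw [pvRow_set]
    split_ifs with hi
    · subst hi; rw [← h.2 i]; simp
    · exact h.2 i

lemma countP_set_none (row : List (Option Int)) (x : Nat) (v : Int) (hx : x < row.length)
    (hc : row[x] = none) :
    (row.set x (some v)).countP (fun o => o = none) + 1 = row.countP (fun o => o = none) := by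
  induction row generalizing x with
  | nil => simp at hx
  | cons a t ih =>
    cases x with
    | zero => simp at hc; subst hc; simp
    | succ n =>
      simp only [List.set_cons_succ, List.countP_cons]
      have := ih n (by simpa using hx) (by simpa using hc)
      omega

lemma pvCountNone_set_lt (E : List (List (Option Int))) (y x : Nat) (v : Int)
    (hy : y < E.length) (hx : x < (pvRow E y).length)
    (hc : (pvRow E y).getD x none = none) :
    pvCountNone (pvSet E y x (some v)) < pvCountNone E := by
  unfold pvCountNone pvSet
  induction E generalizing y with
  | nil => simp at hy
  | cons r t ih =>
    cases y with
    | zero =>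
      simp only [List.modify_zero_cons]
      simp only [List.map_cons, List.sum_cons]
      have hx' : x < r.length := by simpa [pvRow] using hx
      have hc' : r[x] = none := by
        have := hc; rw [pvRow, List.getD_eq_getElem _ _ (by simpa [pvRow] using hx')] at this; simpa [pvRow] using this
      have := countP_set_none r x v hx' hc'
      omega
    | succ n =>
      simp only [List.modify_succ_cons, List.map_cons, List.sum_cons]
      have := ih n (by simpa using hy) (by simpa [pvRow] using hx) (by simpa [pvRow] using hc)
      omega

-- invariant used for A's loop termination: shape kept, measure never grows,
-- and the `triggered` flag forces a strict drop
lemma pvStepA_meas (dirs : List (Int × Int)) (depth : Int) (D : List (List (Option Int)))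
    (st : List (List (Option Int)) × Bool) (y x : Nat)
    (hy : y < D.length) (hx : x < (pvRow D y).length)
    (h : pvShape D st.1 ∧ pvCountNone st.1 ≤ pvCountNone D ∧ (st.2 = true → pvCountNone st.1 < pvCountNone D)) :
    pvShape D (pvStepA dirs depth st y x).1 ∧ pvCountNone (pvStepA dirs depth st y x).1 ≤ pvCountNone D ∧
      ((pvStepA dirs depth st y x).2 = true → pvCountNone (pvStepA dirs depth st y x).1 < pvCountNone D) := by
  rcases h with ⟨hsh, hle, hlt⟩
  unfold pvStepA
  cases hcell : (pvRow st.1 y).getD x none with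
  | some v => exact ⟨hsh, hle, hlt⟩
  | none =>
    simp only
    split
    · have hy' : y < st.1.length := by rw [hsh.1]; exact hy
      have hx' : x < (pvRow st.1 y).length := by rw [hsh.2 y]; exact hx
      have hd := pvCountNone_set_lt st.1 y x depth hy' hx' hcell
      exact ⟨pvShape_set _ _ _ _ _ hsh, by simp; omega, fun _ => by simp; omega⟩
    · exact ⟨hsh, hle, hlt⟩

lemma pvPassA_meas (dirs : List (Int × Int)) (depth : Int) (D : List (List (Option Int))) :
    pvShape D (pvPassA dirs depth D).1 ∧ pvCountNone (pvPassA dirs depth D).1 ≤ pvCountNone D ∧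
      ((pvPassA dirs depth D).2 = true → pvCountNone (pvPassA dirs depth D).1 < pvCountNone D) := by
  unfold pvPassA
  refine List.foldlRecOn (motive := fun (st : List (List (Option Int)) × Bool) => pvShape D st.1 ∧ pvCountNone st.1 ≤ pvCountNone D ∧ (st.2 = true → pvCountNone st.1 < pvCountNone D)) _ _ ⟨pvShape_refl D, le_refl _, by simp⟩ ?_
  intro st hst y hy
  have hy' : y < D.length := List.mem_range.mp hy
  refine List.foldlRecOn (motive := fun (st : List (List (Option Int)) × Bool) => pvShape D st.1 ∧ pvCountNone st.1 ≤ pvCountNone D ∧ (st.2 = true → pvCountNone st.1 < pvCountNone D)) _ _ hst ?_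
  intro st2 hst2 x hx
  have hx' : x < (pvRow D y).length := by
    have := List.mem_range.mp hx
    rwa [hst.1.2 y] at this
  exact pvStepA_meas dirs depth D st2 y x hy' hx' hst2

-- A's `while triggered` loop, counting depth up from `depth`
def pvLoopA (dirs : List (Int × Int)) (depth : Int) (D : List (List (Option Int))) :
    List (List (Option Int)) :=
  let r := pvPassA dirs (depth + 1) D
  if h : r.2 then pvLoopA dirs (depth + 1) r.1 else r.1
termination_by pvCountNone D
decreasing_by exact (pvPassA_meas dirs (depth + 1) D).2.2 h

def calc_depths (grid : List (List String)) (directions : List (Int × Int)) :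
    List (List (Option Int)) :=
  pvLoopA directions 0 (pvInit grid)

-- ===== PORT B =====

-- B's seeding loop: every non-'#' cell goes into the dict at depth 0 and into the frontier
def pvSeedB (grid : List (List String)) :
    PySem.Dict (Int × Int) Int × List (Int × Int) :=
  (PySem.List.enumerate grid 0).foldl (fun acc p =>
    (PySem.List.enumerate p.2 0).foldl (fun acc q =>
      if q.2 ≠ "#" then (acc.1.insert (p.1, q.1) 0, acc.2 ++ [(p.1, q.1)])
      else acc) acc)
    (PySem.Dict.empty, [])

-- B's inner body: push `depth` from frontier cell c backwards along direction d
def pvRelaxB (grid : List (List String)) (depth : Int)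
    (st : PySem.Dict (Int × Int) Int × List (Int × Int)) (c d : Int × Int) :
    PySem.Dict (Int × Int) Int × List (Int × Int) :=
  let ny := c.1 - d.2
  let nx := c.2 - d.1
  if (0 ≤ ny ∧ ny < (grid.length : Int) ∧ 0 ≤ nx ∧ nx < ((grid.getD ny.toNat []).length : Int))
      ∧ st.1.contains (ny, nx) = false
  then (st.1.insert (ny, nx) depth, st.2 ++ [(ny, nx)])
  else st

-- one BFS round: expand the whole frontier, collecting the next one
def pvRoundB (grid : List (List String)) (dirs : List (Int × Int)) (depth : Int)
    (m : PySem.Dict (Int × Int) Int) (F : List (Int × Int)) :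
    PySem.Dict (Int × Int) Int × List (Int × Int) :=
  F.foldl (fun st c => dirs.foldl (fun st d => pvRelaxB grid depth st c d) st) (m, [])

-- termination bookkeeping for B's while loop: the in-bounds cells of the grid
def pvCells (grid : List (List String)) : List (Int × Int) :=
  (PySem.List.enumerate grid 0).flatMap (fun p =>
    (PySem.List.enumerate p.2 0).map (fun q => (p.1, q.1)))

-- number of in-bounds cells the dict does not know yet: B's termination measure
def pvMissing (grid : List (List String)) (m : PySem.Dict (Int × Int) Int) : Nat :=
  (pvCells grid).countP (fun c => !m.contains c)

lemma mem_pvCells (grid : List (List String)) (y x : Int) :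
    (y, x) ∈ pvCells grid ↔
      (0 ≤ y ∧ y < (grid.length : Int) ∧ 0 ≤ x ∧ x < ((grid.getD y.toNat []).length : Int)) := by
  unfold pvCells
  rw [List.mem_flatMap]
  constructor
  · rintro ⟨p, hp, hmem⟩
    rw [PySem.List.mem_enumerate_iff] at hp
    obtain ⟨k, hk, rfl⟩ := hp
    rw [List.mem_map] at hmem
    obtain ⟨q, hq, hpair⟩ := hmem
    rw [PySem.List.mem_enumerate_iff] at hq
    obtain ⟨j, hj, rfl⟩ := hq
    simp only [Prod.mk.injEq] at hpair
    obtain ⟨hy, hx⟩ := hpair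
    have hyk : y = (k : Int) := by omega
    have hxj : x = (j : Int) := by omega
    subst hyk; subst hxj
    refine ⟨by omega, by exact_mod_cast hk, by omega, ?_⟩
    rw [Int.toNat_natCast, List.getD_eq_getElem _ _ hk]
    exact_mod_cast hj
  · rintro ⟨h1, h2, h3, h4⟩
    have hk : y.toNat < grid.length := by omega
    rw [List.getD_eq_getElem _ _ hk] at h4
    have hj : x.toNat < (grid[y.toNat]'hk).length := by omega
    refine ⟨((y.toNat : Int), grid[y.toNat]'hk), ?_, ?_⟩
    · rw [PySem.List.mem_enumerate_iff]
      exact ⟨y.toNat, hk, by simp⟩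
    · rw [List.mem_map]
      refine ⟨((x.toNat : Int), (grid[y.toNat]'hk)[x.toNat]'hj), ?_, ?_⟩
      · rw [PySem.List.mem_enumerate_iff]
        exact ⟨x.toNat, hj, by simp⟩
      · simp only [Prod.mk.injEq]
        constructor <;> omega

lemma countP_flip_lt {α : Type} (l : List α) (p q : α → Bool)
    (hmono : ∀ a ∈ l, q a = true → p a = true) (c : α) (hc : c ∈ l)
    (hp : p c = true) (hq : q c = false) : l.countP q < l.countP p := by
  induction l with
  | nil => simp at hc
  | cons a t ih =>
    rw [List.countP_cons, List.countP_cons]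
    rcases List.mem_cons.mp hc with rfl | hct
    · have hle : t.countP q ≤ t.countP p :=
        List.countP_mono_left (fun b hb => hmono b (by simp [hb]))
      rw [hp, hq]
      simp only [if_true, Bool.false_eq_true, if_false]
      omega
    · have hstrict := ih (fun b hb => hmono b (by simp [hb])) hct
      have hhead : (if q a = true then 1 else 0) ≤ (if p a = true then 1 else 0) := by
        by_cases h : q a = true
        · rw [if_pos h, if_pos (hmono a (by simp) h)]
        · simp [h]
      omega

-- dict growth through one round: old keys survive, new frontier cells are fresh in-bounds keys
lemma pvRoundB_inv (grid : List (List String)) (dirs : List (Int × Int)) (depth : Int)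
    (m : PySem.Dict (Int × Int) Int) (F : List (Int × Int)) :
    (∀ c, m.contains c = true → (pvRoundB grid dirs depth m F).1.contains c = true) ∧
      (∀ c ∈ (pvRoundB grid dirs depth m F).2,
        c ∈ pvCells grid ∧ m.contains c = false ∧ (pvRoundB grid dirs depth m F).1.contains c = true) := by
  unfold pvRoundB
  refine List.foldlRecOn (motive := fun (st : PySem.Dict (Int × Int) Int × List (Int × Int)) =>
    (∀ c, m.contains c = true → st.1.contains c = true) ∧
      (∀ c ∈ st.2, c ∈ pvCells grid ∧ m.contains c = false ∧ st.1.contains c = true)) _ _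
    ⟨fun c h => h, by simp⟩ ?_
  intro st hst f _
  refine List.foldlRecOn (motive := fun (st : PySem.Dict (Int × Int) Int × List (Int × Int)) =>
    (∀ c, m.contains c = true → st.1.contains c = true) ∧
      (∀ c ∈ st.2, c ∈ pvCells grid ∧ m.contains c = false ∧ st.1.contains c = true)) _ _ hst ?_
  intro st2 hst2 d _
  obtain ⟨hmono, hnew⟩ := hst2
  unfold pvRelaxB
  simp only
  split
  · rename_i hcond
    constructor
    · intro c hc
      rw [PySem.Dict.contains_insert]
      simp [hmono c hc]
    · intro c hc
      rcases List.mem_append.mp hc with hc | hc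
      · obtain ⟨h1, h2, h3⟩ := hnew c hc
        refine ⟨h1, h2, ?_⟩
        rw [PySem.Dict.contains_insert]
        simp [h3]
      · rw [List.mem_singleton] at hc
        subst hc
        refine ⟨(mem_pvCells grid _ _).mpr hcond.1, ?_, ?_⟩
        · cases h : m.contains (f.1 - d.2, f.2 - d.1)
          · rfl
          · exact absurd (hmono _ h) (by simp [hcond.2])
        · rw [PySem.Dict.contains_insert]
          simp
  · exact ⟨hmono, hnew⟩

lemma pvRoundB_missing (grid : List (List String)) (dirs : List (Int × Int)) (depth : Int)
    (m : PySem.Dict (Int × Int) Int) (F : List (Int × Int)) :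
    pvMissing grid (pvRoundB grid dirs depth m F).1 ≤ pvMissing grid m ∧
      ((pvRoundB grid dirs depth m F).2 ≠ [] →
        pvMissing grid (pvRoundB grid dirs depth m F).1 < pvMissing grid m) := by
  obtain ⟨hmono, hnew⟩ := pvRoundB_inv grid dirs depth m F
  constructor
  · apply List.countP_mono_left
    intro a _ ha
    cases h : m.contains a
    · rfl
    · rw [Bool.not_eq_eq_eq_not] at ha
      simp only [Bool.not_true] at ha
      exact absurd (hmono a h) (by simp [ha])
  · intro hne
    obtain ⟨c, hc⟩ := List.exists_mem_of_ne_nil _ hne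
    obtain ⟨h1, h2, h3⟩ := hnew c hc
    apply countP_flip_lt _ _ _ ?_ c h1 (by simp [h2]) (by simp [h3])
    intro a _ ha
    cases h : m.contains a
    · rfl
    · rw [Bool.not_eq_eq_eq_not] at ha
      simp only [Bool.not_true] at ha
      exact absurd (hmono a h) (by simp [ha])

-- B's `while frontier` loop
def pvLoopB (grid : List (List String)) (dirs : List (Int × Int)) (depth : Int)
    (m : PySem.Dict (Int × Int) Int) (F : List (Int × Int)) : PySem.Dict (Int × Int) Int :=
  if F = [] then m
  else
    let r := pvRoundB grid dirs (depth + 1) m F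
    pvLoopB grid dirs (depth + 1) r.1 r.2
termination_by pvMissing grid m + (if F = [] then 0 else 1)
decreasing_by
  rcases pvRoundB_missing grid dirs (depth + 1) m F with ⟨hle, hlt⟩
  by_cases hF2 : (pvRoundB grid dirs (depth + 1) m F).2 = [] <;> simp [hF2, *] <;> omega

-- B's final comprehension: read every cell of the result grid out of the dict
def calc_depths_alt (grid : List (List String)) (directions : List (Int × Int)) :
    List (List (Option Int)) :=
  let s := pvSeedB grid
  let m := pvLoopB grid directions 0 s.1 s.2
  (PySem.List.enumerate grid 0).map (fun p =>
    (PySem.List.enumerate p.2 0).map (fun q => m.get? (p.1, q.1)))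

-- ===== PRECONDITION & SPEC =====
def Spec_calc_depths (grid : List (List String)) (directions : List (Int × Int)) (out : List (List (Option Int))) : Prop := out = calc_depths_alt grid directions
instance (grid : List (List String)) (directions : List (Int × Int)) (out : List (List (Option Int))) : Decidable (Spec_calc_depths grid directions out) := by unfold Spec_calc_depths; infer_instance

-- ===== CLAIM (what is proved, stated in full; the proofs are below) =====
def Claim_equal_calc_depths : Prop := ∀ (grid : List (List String)) (directions : List (Int × Int)), Dom_calc_depths grid directions → Spec_calc_depths grid directions (calc_depths grid directions)

-- ===== LEMMAS AND PROOFS =====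

-- cell value at Int coordinates; `none` both for '#' cells and out-of-range positions
def gv (D : List (List (Option Int))) (y x : Int) : Option Int :=
  if 0 ≤ y ∧ 0 ≤ x then (pvRow D y.toNat).getD x.toNat none else none

-- in-bounds predicate
abbrev pvInb (D : List (List (Option Int))) (y x : Int) : Prop :=
  0 ≤ y ∧ 0 ≤ x ∧ y.toNat < D.length ∧ x.toNat < (pvRow D y.toNat).length

-- "some in-range neighbour already carries a value" (the snapshot trigger condition)
def condB (D : List (List (Option Int))) (dirs : List (Int × Int)) (y x : Int) : Bool :=
  dirs.any (fun d => (gv D (y + d.2) (x + d.1)).isSome)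

-- the common pointwise description of one synchronous level: every empty cell with a
-- valued in-range neighbour receives `depth`
def stepG (dirs : List (Int × Int)) (depth : Int) (D : List (List (Option Int))) :
    List (List (Option Int)) :=
  D.mapIdx (fun y row => row.mapIdx (fun x v =>
    if v.isNone && condB D dirs (y : Int) (x : Int) then some depth else v))

-- a cell A's pass (and B's round) assigns
abbrev aAsgn (dirs : List (Int × Int)) (D : List (List (Option Int))) (y x : Int) : Prop :=
  pvInb D y x ∧ gv D y x = none ∧ condB D dirs y x = true

-- all stored values are < k
def pvBelow (D : List (List (Option Int))) (k : Int) : Prop :=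
  ∀ y x v : Int, gv D y x = some v → v < k

-- every valued in-range neighbour of an empty cell carries exactly k
def pvNbrInv (D : List (List (Option Int))) (dirs : List (Int × Int)) (k : Int) : Prop :=
  ∀ y x : Int, pvInb D y x → gv D y x = none →
    ∀ d ∈ dirs, ∀ v : Int, gv D (y + d.2) (x + d.1) = some v → v = k

-- the frontier is exactly the cells at value k
def pvFrontEq (D : List (List (Option Int))) (k : Int) (F : List (Int × Int)) : Prop :=
  ∀ c : Int × Int, c ∈ F ↔ gv D c.1 c.2 = some k

-- B's dict agrees with a grid state everywhere
def pvRel (D : List (List (Option Int))) (m : PySem.Dict (Int × Int) Int) : Prop :=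
  ∀ y x : Int, gv D y x = m.get? (y, x)

-- the grid of strings and a grid of depths have the same row lengths
def pvGridShape (grid : List (List String)) (D : List (List (Option Int))) : Prop :=
  D.length = grid.length ∧ ∀ i : Nat, (pvRow D i).length = (grid.getD i []).length

lemma gv_natCast (D : List (List (Option Int))) (y x : Nat) :
    gv D (y : Int) (x : Int) = (pvRow D y).getD x none := by
  simp [gv]

lemma gv_of_not_inb (D : List (List (Option Int))) (y x : Int) (h : ¬ pvInb D y x) :
    gv D y x = none := by
  unfold pvInb at h
  unfold gv
  split
  · rename_i hnn
    rcases Nat.lt_or_ge y.toNat D.length with hy | hy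
    · rcases Nat.lt_or_ge x.toNat (pvRow D y.toNat).length with hx | hx
      · exact absurd ⟨hnn.1, hnn.2, hy, hx⟩ h
      · exact List.getD_eq_default _ _ hx
    · unfold pvRow
      rw [List.getD_eq_default _ _ hy]
      rfl
  · rfl

lemma pvInb_shape (D E : List (List (Option Int))) (y x : Int) (h : pvShape D E) :
    pvInb E y x ↔ pvInb D y x := by
  unfold pvInb
  rw [h.1, h.2 y.toNat]

lemma gv_set (E : List (List (Option Int))) (y x : Nat) (v : Option Int)
    (hy : y < E.length) (hx : x < (pvRow E y).length) (a b : Int) :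
    gv (pvSet E y x v) a b = if a = (y : Int) ∧ b = (x : Int) then v else gv E a b := by
  by_cases hm : a = (y : Int) ∧ b = (x : Int)
  · rw [if_pos hm]
    obtain ⟨ha, hb⟩ := hm
    subst ha; subst hb
    rw [gv_natCast, pvRow_set, if_pos rfl]
    rw [List.getD_eq_getElem _ _ (by simpa using hx)]
    simp
  · rw [if_neg hm]
    unfold gv
    split
    · rename_i hab
      rw [pvRow_set]
      by_cases ha : a.toNat = y
      · rw [if_pos ha, ha]
        unfold List.getD
        rw [List.getElem?_set_ne (by omega)]
      · rw [if_neg ha]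
    · rfl

lemma pvExt (D E₁ E₂ : List (List (Option Int))) (h1 : pvShape D E₁) (h2 : pvShape D E₂)
    (h : ∀ y x : Nat, gv E₁ (y : Int) (x : Int) = gv E₂ (y : Int) (x : Int)) : E₁ = E₂ := by
  have hlen : E₁.length = E₂.length := by rw [h1.1, h2.1]
  apply List.ext_getElem hlen
  intro y hy1 hy2
  have hrow : (pvRow E₁ y).length = (pvRow E₂ y).length := by rw [h1.2 y, h2.2 y]
  have hr1 : pvRow E₁ y = E₁[y] := List.getD_eq_getElem _ _ hy1
  have hr2 : pvRow E₂ y = E₂[y] := List.getD_eq_getElem _ _ hy2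
  apply List.ext_getElem (by rw [← hr1, ← hr2, hrow])
  intro x hx1 hx2
  have := h y x
  rw [gv_natCast, gv_natCast, hr1, hr2] at this
  rwa [List.getD_eq_getElem _ _ hx1, List.getD_eq_getElem _ _ hx2] at this

lemma stepG_shape (dirs : List (Int × Int)) (depth : Int) (D : List (List (Option Int))) :
    pvShape D (stepG dirs depth D) := by
  constructor
  · simp [stepG]
  · intro i
    unfold pvRow
    rcases Nat.lt_or_ge i D.length with hi | hi
    · rw [List.getD_eq_getElem _ _ (by simpa [stepG] using hi), List.getD_eq_getElem _ _ hi]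
      simp [stepG]
    · rw [List.getD_eq_default _ _ (by simpa [stepG] using hi), List.getD_eq_default _ _ hi]

lemma gv_stepG (dirs : List (Int × Int)) (depth : Int) (D : List (List (Option Int))) (y x : Int) :
    gv (stepG dirs depth D) y x =
      if aAsgn dirs D y x then some depth else gv D y x := by
  by_cases hin : pvInb D y x
  · have hy0 : 0 ≤ y := hin.1
    have hx0 : 0 ≤ x := hin.2.1
    have hyl : y.toNat < D.length := hin.2.2.1
    have hxl : x.toNat < (pvRow D y.toNat).length := hin.2.2.2
    have hrow : pvRow D y.toNat = D[y.toNat]'hyl := List.getD_eq_getElem _ _ hyl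
    have hxl' : x.toNat < (D[y.toNat]'hyl).length := by rw [← hrow]; exact hxl
    have hgD : gv D y x = (D[y.toNat]'hyl)[x.toNat]'hxl' := by
      unfold gv
      rw [if_pos ⟨hy0, hx0⟩, hrow, List.getD_eq_getElem _ _ hxl']
    have hlen : (stepG dirs depth D).length = D.length := (stepG_shape dirs depth D).1
    have hyl2 : y.toNat < (stepG dirs depth D).length := by omega
    have hgE : gv (stepG dirs depth D) y x =
        if ((D[y.toNat]'hyl)[x.toNat]'hxl').isNone && condB D dirs ((y.toNat : Nat) : Int) ((x.toNat : Nat) : Int)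
        then some depth else (D[y.toNat]'hyl)[x.toNat]'hxl' := by
      unfold gv
      rw [if_pos ⟨hy0, hx0⟩]
      unfold pvRow
      rw [List.getD_eq_getElem _ _ hyl2]
      simp only [stepG, List.getElem_mapIdx]
      rw [List.getD_eq_getElem _ _ (by simpa using hxl')]
      simp
    rw [hgE]
    have hyc : ((y.toNat : Nat) : Int) = y := by omega
    have hxc : ((x.toNat : Nat) : Int) = x := by omega
    rw [hyc, hxc]
    by_cases hn : (D[y.toNat]'hyl)[x.toNat]'hxl' = none
    · by_cases hcnd : condB D dirs y x = true
      · rw [if_pos (by simp [hn, hcnd]), if_pos ⟨hin, by rw [hgD]; exact hn, hcnd⟩]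
      · rw [if_neg (by simp [hn, hcnd])]
        rw [if_neg (by intro h; exact hcnd h.2.2)]
        exact hgD.symm
    · rw [if_neg (by simp [Option.isNone_iff_eq_none, hn])]
      rw [if_neg (by intro h; exact hn (by rw [← hgD]; exact h.2.1))]
      exact hgD.symm
  · have h1 : gv (stepG dirs depth D) y x = none := by
      apply gv_of_not_inb
      rw [pvInb_shape D _ y x (stepG_shape dirs depth D)]
      exact hin
    rw [h1, if_neg (by intro h; exact hin h.1), gv_of_not_inb D y x hin]

-- states reachable inside one pass/round: original values, plus `depth` on cells that were empty
def pvLift (depth : Int) (D E : List (List (Option Int))) : Prop :=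
  pvShape D E ∧ ∀ y x : Int, gv E y x = gv D y x ∨ (gv D y x = none ∧ gv E y x = some depth)

lemma gv_pos (E : List (List (Option Int))) (ny nx : Int) (h1 : 0 ≤ ny) (h2 : 0 ≤ nx) :
    gv E ny nx = (pvRow E ny.toNat).getD nx.toNat none := by
  unfold gv
  rw [if_pos ⟨h1, h2⟩]

lemma pvChk_iff (E : List (List (Option Int))) (ny nx : Int) :
    (0 ≤ ny ∧ ny < (E.length : Int) ∧ 0 ≤ nx ∧ nx < ((pvRow E ny.toNat).length : Int))
      ↔ pvInb E ny nx := by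
  unfold pvInb
  omega

-- B's in-range test (on the string grid) decides pvInb of any same-shape depth grid
lemma pvChkS_iff (grid : List (List String)) (D : List (List (Option Int)))
    (h : pvGridShape grid D) (ny nx : Int) :
    (0 ≤ ny ∧ ny < (grid.length : Int) ∧ 0 ≤ nx ∧ nx < ((grid.getD ny.toNat []).length : Int))
      ↔ pvInb D ny nx := by
  unfold pvInb
  rw [← h.1, ← h.2 ny.toNat]
  omega

lemma pvGridShape_init (grid : List (List String)) : pvGridShape grid (pvInit grid) := by
  constructor
  · simp [pvInit]
  · intro i
    unfold pvRow pvInit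
    rcases Nat.lt_or_ge i grid.length with hi | hi
    · rw [List.getD_eq_getElem _ _ (by simpa using hi), List.getD_eq_getElem _ _ hi]
      simp
    · rw [List.getD_eq_default _ _ (by simpa using hi), List.getD_eq_default _ _ hi]
      rfl

lemma pvGridShape_of_shape (grid : List (List String)) (D E : List (List (Option Int)))
    (h : pvGridShape grid D) (hsh : pvShape D E) : pvGridShape grid E := by
  refine ⟨by rw [hsh.1, h.1], fun i => by rw [hsh.2 i, h.2 i]⟩

lemma pvNbrs_cons (E : List (List (Option Int))) (dirs : List (Int × Int)) (y x : Int)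
    (d : Int × Int) :
    pvNbrs E (d :: dirs) y x =
      (if pvInb E (y + d.2) (x + d.1) then [gv E (y + d.2) (x + d.1)] else [])
        ++ pvNbrs E dirs y x := by
  unfold pvNbrs
  rw [List.filterMap_cons]
  by_cases hc : pvInb E (y + d.2) (x + d.1)
  · rw [if_pos hc, if_pos ((pvChk_iff E _ _).mpr hc), gv_pos E _ _ hc.1 hc.2.1]
    rfl
  · rw [if_neg hc, if_neg (fun h => hc ((pvChk_iff E _ _).mp h))]
    rfl

lemma pvLift_gD_none (D E : List (List (Option Int))) (depth : Int) (ny nx : Int)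
    (hl : pvLift depth D E) (hc : ¬ pvInb E ny nx) : gv D ny nx = none := by
  apply gv_of_not_inb
  intro h
  exact hc ((pvInb_shape D E ny nx hl.1).mpr h)

lemma nbrs_any (D E : List (List (Option Int))) (dirs : List (Int × Int)) (depth : Int)
    (y x : Int) (hb : pvBelow D depth) (hl : pvLift depth D E) :
    ((pvNbrs E dirs y x).any fun o => match o with | none => false | some v => v != depth)
      = condB D dirs y x := by
  induction dirs with
  | nil => simp [pvNbrs, condB]
  | cons d ds ih =>
    rw [pvNbrs_cons, condB]
    rw [List.any_cons, List.any_append]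
    rw [← condB, ih]
    by_cases hc : pvInb E (y + d.2) (x + d.1)
    · rw [if_pos hc]
      simp only [List.any_cons, List.any_nil, Bool.or_false]
      rcases hl.2 (y + d.2) (x + d.1) with heq | ⟨hD, hE⟩
      · rw [heq]
        cases hgd : gv D (y + d.2) (x + d.1) with
        | none => simp
        | some v =>
          have := hb _ _ _ hgd
          simp only [Option.isSome_some]
          have : (v != depth) = true := by simp; omega
          rw [this]
      · rw [hE, hD]
        simp
    · rw [if_neg hc]
      rw [pvLift_gD_none D E depth _ _ hl hc]
      simp

lemma nbrs_all (D E : List (List (Option Int))) (dirs : List (Int × Int)) (depth : Int)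
    (y x : Int) (hb : pvBelow D depth) (hl : pvLift depth D E) :
    ((pvNbrs E dirs y x).all fun o => match o with | none => true | some v => decide (v ≤ depth))
      = true := by
  induction dirs with
  | nil => simp [pvNbrs]
  | cons d ds ih =>
    rw [pvNbrs_cons, List.all_append, ih]
    by_cases hc : pvInb E (y + d.2) (x + d.1)
    · rw [if_pos hc]
      simp only [List.all_cons, List.all_nil, Bool.and_true, Bool.and_true]
      rcases hl.2 (y + d.2) (x + d.1) with heq | ⟨hD, hE⟩
      · rw [heq]
        cases hgd : gv D (y + d.2) (x + d.1) with
        | none => simp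
        | some v =>
          have := hb _ _ _ hgd
          simp
          omega
      · rw [hE]
        simp
    · rw [if_neg hc]
      simp

-- ----- A's pass computes stepG -----

def AInv (dirs : List (Int × Int)) (depth : Int) (D : List (List (Option Int)))
    (S : Int × Int → Prop) (st : List (List (Option Int)) × Bool) : Prop :=
  pvShape D st.1 ∧
  (∀ y x : Int, ¬ (S (y, x) ∧ aAsgn dirs D y x) → gv st.1 y x = gv D y x) ∧
  (∀ y x : Int, S (y, x) → aAsgn dirs D y x → gv st.1 y x = some depth) ∧
  (st.2 = true ↔ ∃ c : Int × Int, S c ∧ aAsgn dirs D c.1 c.2)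

lemma AInv_congr (dirs : List (Int × Int)) (depth : Int) (D : List (List (Option Int)))
    (S S' : Int × Int → Prop) (st : List (List (Option Int)) × Bool)
    (h : ∀ c, S c ↔ S' c) (hA : AInv dirs depth D S st) : AInv dirs depth D S' st := by
  obtain ⟨hsh, h2, h3, h4⟩ := hA
  refine ⟨hsh, ?_, ?_, ?_⟩
  · intro a b hn
    exact h2 a b (fun hc => hn ⟨(h _).mp hc.1, hc.2⟩)
  · intro a b hS hAs
    exact h3 a b ((h _).mpr hS) hAs
  · rw [h4]
    constructor
    · rintro ⟨c, hS, hAs⟩; exact ⟨c, (h c).mp hS, hAs⟩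
    · rintro ⟨c, hS, hAs⟩; exact ⟨c, (h c).mpr hS, hAs⟩

lemma AInv_lift (dirs : List (Int × Int)) (depth : Int) (D : List (List (Option Int)))
    (S : Int × Int → Prop) (st : List (List (Option Int)) × Bool)
    (hA : AInv dirs depth D S st) : pvLift depth D st.1 := by
  refine ⟨hA.1, fun y x => ?_⟩
  by_cases h : S (y, x) ∧ aAsgn dirs D y x
  · exact Or.inr ⟨h.2.2.1, hA.2.2.1 y x h.1 h.2⟩
  · exact Or.inl (hA.2.1 y x h)

lemma AInv_extend (dirs : List (Int × Int)) (depth : Int) (D : List (List (Option Int)))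
    (S : Int × Int → Prop) (st : List (List (Option Int)) × Bool) (c : Int × Int)
    (himp : aAsgn dirs D c.1 c.2 → S c) (hA : AInv dirs depth D S st) :
    AInv dirs depth D (fun c' => S c' ∨ c' = c) st := by
  obtain ⟨hsh, h2, h3, h4⟩ := hA
  refine ⟨hsh, ?_, ?_, ?_⟩
  · intro a b hn
    exact h2 a b (fun hc => hn ⟨Or.inl hc.1, hc.2⟩)
  · rintro a b (hS | hc) hAs
    · exact h3 a b hS hAs
    · subst hc
      exact h3 a b (himp hAs) hAs
  · rw [h4]
    constructor
    · rintro ⟨c', hS, hAs⟩; exact ⟨c', Or.inl hS, hAs⟩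
    · rintro ⟨c', hS | hc, hAs⟩
      · exact ⟨c', hS, hAs⟩
      · subst hc; exact ⟨c', himp hAs, hAs⟩

lemma AInv_step (dirs : List (Int × Int)) (depth : Int) (D : List (List (Option Int)))
    (S : Int × Int → Prop) (st : List (List (Option Int)) × Bool) (y x : Nat)
    (hb : pvBelow D depth) (hy : y < D.length) (hx : x < (pvRow D y).length)
    (hA : AInv dirs depth D S st) :
    AInv dirs depth D (fun c => S c ∨ c = ((y : Int), (x : Int))) (pvStepA dirs depth st y x) := by
  have hsh := hA.1
  have hyE : y < st.1.length := by rw [hsh.1]; exact hy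
  have hxE : x < (pvRow st.1 y).length := by rw [hsh.2 y]; exact hx
  unfold pvStepA
  cases hcell : (pvRow st.1 y).getD x none with
  | some v =>
    apply AInv_extend dirs depth D S st _ ?_ hA
    intro hAs
    by_contra hS
    have h0 := hA.2.1 ((y : Nat) : Int) ((x : Nat) : Int) (fun hc => hS hc.1)
    rw [gv_natCast, hcell] at h0
    rw [hAs.2.1] at h0
    simp at h0
  | none =>
    simp only
    rw [nbrs_any D st.1 dirs depth _ _ hb (AInv_lift _ _ _ _ _ hA),
        nbrs_all D st.1 dirs depth _ _ hb (AInv_lift _ _ _ _ _ hA)]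
    by_cases hcnd : condB D dirs (y : Int) (x : Int) = true
    · rw [hcnd]
      simp only [Bool.and_true, if_true]
      have hDnone : gv D ((y : Nat) : Int) ((x : Nat) : Int) = none := by
        by_cases hS : S ((y : Int), (x : Int)) ∧ aAsgn dirs D (y : Int) (x : Int)
        · exfalso
          have h0 := hA.2.2.1 _ _ hS.1 hS.2
          rw [gv_natCast, hcell] at h0
          simp at h0
        · have h0 := hA.2.1 ((y : Nat) : Int) ((x : Nat) : Int) hS
          rw [gv_natCast, hcell] at h0
          exact h0.symm
      have hAs : aAsgn dirs D (y : Int) (x : Int) :=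
        ⟨⟨by omega, by omega, by simpa using hy, by simpa using hx⟩, hDnone, hcnd⟩
      refine ⟨pvShape_set _ _ _ _ _ hsh, ?_, ?_, ?_⟩
      · intro a b hn
        rw [gv_set st.1 y x _ hyE hxE, if_neg ?_]
        · exact hA.2.1 a b (fun hc => hn ⟨Or.inl hc.1, hc.2⟩)
        · rintro ⟨ha, hb2⟩
          subst ha; subst hb2
          exact hn ⟨Or.inr rfl, hAs⟩
      · rintro a b (hS | hc) hAs2
        · rw [gv_set st.1 y x _ hyE hxE]
          split_ifs with he
          · rfl
          · exact hA.2.2.1 a b hS hAs2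
        · have hab : a = ((y : Nat) : Int) ∧ b = ((x : Nat) : Int) := Prod.mk.inj hc
          rw [gv_set st.1 y x _ hyE hxE, if_pos hab]
      · simp only
        constructor
        · intro _; exact ⟨((y : Int), (x : Int)), Or.inr rfl, hAs⟩
        · intro _; trivial
    · have hcf : condB D dirs (y : Int) (x : Int) = false := by
        simpa using hcnd
      rw [hcf]
      simp only [Bool.false_and, if_false]
      apply AInv_extend dirs depth D S st _ ?_ hA
      intro hAs
      exact absurd hAs.2.2 hcnd

lemma AInv_fold_x (dirs : List (Int × Int)) (depth : Int) (D : List (List (Option Int)))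
    (y : Nat) (hb : pvBelow D depth) (hy : y < D.length) :
    ∀ (xs : List Nat) (S : Int × Int → Prop) (st : List (List (Option Int)) × Bool),
      (∀ x ∈ xs, x < (pvRow D y).length) → AInv dirs depth D S st →
      AInv dirs depth D (fun c => S c ∨ ∃ x ∈ xs, c = ((y : Int), (x : Int)))
        (xs.foldl (fun st x => pvStepA dirs depth st y x) st) := by
  intro xs
  induction xs with
  | nil =>
    intro S st hxs hA
    simp only [List.foldl_nil]
    exact AInv_congr _ _ _ _ _ _ (fun c => by simp) hA
  | cons x xs ih =>
    intro S st hxs hA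
    simp only [List.foldl_cons]
    have h1 := AInv_step dirs depth D S st y x hb hy (hxs x (by simp)) hA
    have h2 := ih _ _ (fun x' hx' => hxs x' (by simp [hx'])) h1
    apply AInv_congr _ _ _ _ _ _ ?_ h2
    intro c
    simp only [List.mem_cons]
    constructor
    · rintro ((hS | hc) | ⟨x', hx', hc⟩)
      · exact Or.inl hS
      · exact Or.inr ⟨x, Or.inl rfl, hc⟩
      · exact Or.inr ⟨x', Or.inr hx', hc⟩
    · rintro (hS | ⟨x', hx' | hx', hc⟩)
      · exact Or.inl (Or.inl hS)
      · subst hx'; exact Or.inl (Or.inr hc)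
      · exact Or.inr ⟨x', hx', hc⟩

lemma AInv_fold_y (dirs : List (Int × Int)) (depth : Int) (D : List (List (Option Int)))
    (hb : pvBelow D depth) :
    ∀ (ys : List Nat) (S : Int × Int → Prop) (st : List (List (Option Int)) × Bool),
      (∀ y ∈ ys, y < D.length) → AInv dirs depth D S st →
      AInv dirs depth D
        (fun c => S c ∨ ∃ y ∈ ys, ∃ x : Nat, x < (pvRow D y).length ∧ c = ((y : Int), (x : Int)))
        (ys.foldl (fun st y =>
          (List.range (pvRow st.1 y).length).foldl (fun st x => pvStepA dirs depth st y x) st) st) := by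
  intro ys
  induction ys with
  | nil =>
    intro S st hys hA
    simp only [List.foldl_nil]
    exact AInv_congr _ _ _ _ _ _ (fun c => by simp) hA
  | cons y ys ih =>
    intro S st hys hA
    simp only [List.foldl_cons]
    have hy : y < D.length := hys y (by simp)
    rw [hA.1.2 y]
    have h1 := AInv_fold_x dirs depth D y hb hy (List.range (pvRow D y).length) S st
      (fun x hx => List.mem_range.mp hx) hA
    have h2 := ih _ _ (fun y' h' => hys y' (by simp [h'])) h1
    apply AInv_congr _ _ _ _ _ _ ?_ h2
    intro c
    simp only [List.mem_cons, List.mem_range]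
    constructor
    · rintro ((hS | ⟨x, hx, hc⟩) | ⟨y', hy', x, hx, hc⟩)
      · exact Or.inl hS
      · exact Or.inr ⟨y, Or.inl rfl, x, hx, hc⟩
      · exact Or.inr ⟨y', Or.inr hy', x, hx, hc⟩
    · rintro (hS | ⟨y', hy' | hy', x, hx, hc⟩)
      · exact Or.inl (Or.inl hS)
      · subst hy'; exact Or.inl (Or.inr ⟨x, hx, hc⟩)
      · exact Or.inr ⟨y', hy', x, hx, hc⟩

lemma passA_char (dirs : List (Int × Int)) (depth : Int) (D : List (List (Option Int)))
    (hb : pvBelow D depth) :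
    AInv dirs depth D (fun c => pvInb D c.1 c.2) (pvPassA dirs depth D) := by
  unfold pvPassA
  have h := AInv_fold_y dirs depth D hb (List.range D.length) (fun _ => False) (D, false)
    (fun y hy => List.mem_range.mp hy)
    ⟨pvShape_refl D, fun a b _ => rfl, fun a b h => h.elim, by simp⟩
  apply AInv_congr _ _ _ _ _ _ ?_ h
  intro c
  simp only [List.mem_range, false_or]
  constructor
  · rintro ⟨y, hy, x, hx, rfl⟩
    exact ⟨by omega, by omega, by simpa using hy, by simpa using hx⟩
  · rintro ⟨h1, h2, h3, h4⟩
    refine ⟨c.1.toNat, h3, c.2.toNat, h4, ?_⟩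
    have e1 : ((c.1.toNat : Nat) : Int) = c.1 := by omega
    have e2 : ((c.2.toNat : Nat) : Int) = c.2 := by omega
    rw [e1, e2]

lemma passA_fst (dirs : List (Int × Int)) (depth : Int) (D : List (List (Option Int)))
    (hb : pvBelow D depth) : (pvPassA dirs depth D).1 = stepG dirs depth D := by
  have h := passA_char dirs depth D hb
  apply pvExt D _ _ h.1 (stepG_shape dirs depth D)
  intro y x
  rw [gv_stepG]
  by_cases hAs : aAsgn dirs D (y : Int) (x : Int)
  · rw [if_pos hAs]
    exact h.2.2.1 _ _ hAs.1 hAs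
  · rw [if_neg hAs]
    exact h.2.1 _ _ (fun hc => hAs hc.2)

lemma passA_snd (dirs : List (Int × Int)) (depth : Int) (D : List (List (Option Int)))
    (hb : pvBelow D depth) :
    (pvPassA dirs depth D).2 = true ↔ ∃ c : Int × Int, aAsgn dirs D c.1 c.2 := by
  have h := passA_char dirs depth D hb
  rw [h.2.2.2]
  constructor
  · rintro ⟨c, _, hAs⟩; exact ⟨c, hAs⟩
  · rintro ⟨c, hAs⟩; exact ⟨c, hAs.1, hAs⟩

-- ----- B's round computes stepG on the dict side -----

def bAsgnT (T : Int × Int → Int × Int → Prop) (D : List (List (Option Int))) (y x : Int) : Prop :=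
  pvInb D y x ∧ gv D y x = none ∧ ∃ f d : Int × Int, T f d ∧ y = f.1 - d.2 ∧ x = f.2 - d.1

def BInvD (depth : Int) (D : List (List (Option Int))) (T : Int × Int → Int × Int → Prop)
    (st : PySem.Dict (Int × Int) Int × List (Int × Int)) : Prop :=
  (∀ y x : Int, ¬ bAsgnT T D y x → st.1.get? (y, x) = gv D y x) ∧
  (∀ y x : Int, bAsgnT T D y x → st.1.get? (y, x) = some depth) ∧
  (∀ c : Int × Int, c ∈ st.2 ↔ bAsgnT T D c.1 c.2)

lemma BInvD_congr (depth : Int) (D : List (List (Option Int)))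
    (T T' : Int × Int → Int × Int → Prop) (st : PySem.Dict (Int × Int) Int × List (Int × Int))
    (h : ∀ f d, T f d ↔ T' f d) (hB : BInvD depth D T st) : BInvD depth D T' st := by
  obtain ⟨h2, h3, h4⟩ := hB
  have key : ∀ y x : Int, bAsgnT T D y x ↔ bAsgnT T' D y x := by
    intro y x
    unfold bAsgnT
    constructor
    · rintro ⟨a, b, f, d, hT, hc⟩; exact ⟨a, b, f, d, (h f d).mp hT, hc⟩
    · rintro ⟨a, b, f, d, hT, hc⟩; exact ⟨a, b, f, d, (h f d).mpr hT, hc⟩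
  refine ⟨?_, ?_, ?_⟩
  · intro y x hn; exact h2 y x (fun hc => hn ((key y x).mp hc))
  · intro y x hc; exact h3 y x ((key y x).mpr hc)
  · intro c; rw [h4 c]; exact key c.1 c.2

lemma BInvD_step (grid : List (List String)) (depth : Int) (D : List (List (Option Int)))
    (hg : pvGridShape grid D) (T : Int × Int → Int × Int → Prop)
    (st : PySem.Dict (Int × Int) Int × List (Int × Int)) (f d : Int × Int)
    (hB : BInvD depth D T st) :
    BInvD depth D (fun f' d' => T f' d' ∨ (f' = f ∧ d' = d)) (pvRelaxB grid depth st f d) := by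
  obtain ⟨h2, h3, h4⟩ := hB
  have key : ∀ y x : Int,
      bAsgnT (fun f' d' => T f' d' ∨ (f' = f ∧ d' = d)) D y x ↔
        (bAsgnT T D y x ∨ (pvInb D y x ∧ gv D y x = none ∧ y = f.1 - d.2 ∧ x = f.2 - d.1)) := by
    intro y x
    unfold bAsgnT
    constructor
    · rintro ⟨a, b, f', d', hT | ⟨hf, hd⟩, hc⟩
      · exact Or.inl ⟨a, b, f', d', hT, hc⟩
      · subst hf; subst hd; exact Or.inr ⟨a, b, hc⟩
    · rintro (⟨a, b, f', d', hT, hc⟩ | ⟨a, b, hc⟩)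
      · exact ⟨a, b, f', d', Or.inl hT, hc⟩
      · exact ⟨a, b, f, d, Or.inr ⟨rfl, rfl⟩, hc⟩
  unfold pvRelaxB
  simp only
  split
  · rename_i hcond
    have hinbD : pvInb D (f.1 - d.2) (f.2 - d.1) := (pvChkS_iff grid D hg _ _).mp hcond.1
    have hfresh : st.1.get? (f.1 - d.2, f.2 - d.1) = none :=
      (PySem.Dict.get?_eq_none_iff_contains _ _).mpr hcond.2
    have hnotB : ¬ bAsgnT T D (f.1 - d.2) (f.2 - d.1) := by
      intro hc
      rw [h3 _ _ hc] at hfresh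
      simp at hfresh
    have hDnone : gv D (f.1 - d.2) (f.2 - d.1) = none := by
      rw [← h2 _ _ hnotB]; exact hfresh
    refine ⟨?_, ?_, ?_⟩
    · intro y x hn
      rw [key] at hn
      rw [PySem.Dict.get?_insert, if_neg ?_]
      · exact h2 y x (fun hc => hn (Or.inl hc))
      · intro hpq
        have hyx : y = f.1 - d.2 ∧ x = f.2 - d.1 := Prod.mk.inj hpq
        exact hn (Or.inr ⟨by rw [hyx.1, hyx.2]; exact hinbD, by rw [hyx.1, hyx.2]; exact hDnone,
          hyx.1, hyx.2⟩)
    · intro y x hc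
      rw [key] at hc
      rw [PySem.Dict.get?_insert]
      rcases hc with hc | ⟨_, _, hy, hx⟩
      · split_ifs with he
        · rfl
        · exact h3 y x hc
      · rw [if_pos (by rw [hy, hx])]
    · intro c
      rw [List.mem_append, List.mem_singleton, h4 c, key]
      constructor
      · rintro (hc | hc)
        · exact Or.inl hc
        · subst hc
          exact Or.inr ⟨hinbD, hDnone, rfl, rfl⟩
      · rintro (hc | ⟨_, _, hy, hx⟩)
        · exact Or.inl hc
        · right
          have : c = (c.1, c.2) := rfl
          rw [this, hy, hx]
  · rename_i hcond
    rw [not_and_or] at hcond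
    rcases hcond with hbnd | hcont
    · have hninbD : ¬ pvInb D (f.1 - d.2) (f.2 - d.1) := fun h =>
        hbnd ((pvChkS_iff grid D hg _ _).mpr h)
      refine ⟨?_, ?_, ?_⟩
      · intro y x hn
        rw [key] at hn
        exact h2 y x (fun hc => hn (Or.inl hc))
      · intro y x hc
        rw [key] at hc
        rcases hc with hc | ⟨hinb', _, hy, hx⟩
        · exact h3 y x hc
        · exact absurd (show pvInb D (f.1 - d.2) (f.2 - d.1) by rw [← hy, ← hx]; exact hinb') hninbD
      · intro c
        rw [h4 c, key]
        constructor
        · exact Or.inl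
        · rintro (hc | ⟨hinb', _, hy, hx⟩)
          · exact hc
          · exact absurd (show pvInb D (f.1 - d.2) (f.2 - d.1) by rw [← hy, ← hx]; exact hinb') hninbD
    · have hsome : st.1.get? (f.1 - d.2, f.2 - d.1) ≠ none := by
        intro h
        exact hcont ((PySem.Dict.get?_eq_none_iff_contains _ _).mp h)
      have hBA : ∀ y x : Int, pvInb D y x → gv D y x = none → y = f.1 - d.2 → x = f.2 - d.1 →
          bAsgnT T D y x := by
        intro y x hinb' hnone' hy hx
        by_contra hnB
        apply hsome
        rw [← hy, ← hx]
        rw [h2 y x hnB, hnone']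
      refine ⟨?_, ?_, ?_⟩
      · intro y x hn
        rw [key] at hn
        exact h2 y x (fun hc => hn (Or.inl hc))
      · intro y x hc
        rw [key] at hc
        rcases hc with hc | ⟨hinb', hnone', hy, hx⟩
        · exact h3 y x hc
        · exact h3 y x (hBA y x hinb' hnone' hy hx)
      · intro c
        rw [h4 c, key]
        constructor
        · exact Or.inl
        · rintro (hc | ⟨hinb', hnone', hy, hx⟩)
          · exact hc
          · exact hBA c.1 c.2 hinb' hnone' hy hx

lemma roundB_char (grid : List (List String)) (dirs : List (Int × Int)) (depth : Int)
    (D : List (List (Option Int))) (hg : pvGridShape grid D)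
    (m : PySem.Dict (Int × Int) Int) (hm : pvRel D m) (F : List (Int × Int)) :
    BInvD depth D (fun f d => f ∈ F ∧ d ∈ dirs) (pvRoundB grid dirs depth m F) := by
  unfold pvRoundB
  have init : BInvD depth D (fun _ _ => False) (m, ([] : List (Int × Int))) := by
    refine ⟨fun y x _ => (hm y x).symm, ?_, ?_⟩
    · rintro y x ⟨_, _, f, d, hF, _⟩
      exact hF.elim
    · intro c
      simp only [List.not_mem_nil, false_iff]
      rintro ⟨_, _, f, d, hF, _⟩
      exact hF
  have main : ∀ (fs : List (Int × Int)) (T : Int × Int → Int × Int → Prop)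
      (st : PySem.Dict (Int × Int) Int × List (Int × Int)),
      BInvD depth D T st →
      BInvD depth D (fun f d => T f d ∨ (f ∈ fs ∧ d ∈ dirs))
        (fs.foldl (fun st f => dirs.foldl (fun st d => pvRelaxB grid depth st f d) st) st) := by
    intro fs
    induction fs with
    | nil =>
      intro T st hB
      simp only [List.foldl_nil]
      exact BInvD_congr _ _ _ _ _ (fun f d => by simp) hB
    | cons f fs ih =>
      intro T st hB
      simp only [List.foldl_cons]
      have inner : ∀ (ds : List (Int × Int)) (T : Int × Int → Int × Int → Prop)
          (st : PySem.Dict (Int × Int) Int × List (Int × Int)),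
          BInvD depth D T st →
          BInvD depth D (fun f' d' => T f' d' ∨ (f' = f ∧ d' ∈ ds))
            (ds.foldl (fun st d => pvRelaxB grid depth st f d) st) := by
        intro ds
        induction ds with
        | nil =>
          intro T st hB
          simp only [List.foldl_nil]
          exact BInvD_congr _ _ _ _ _ (fun f d => by simp) hB
        | cons d ds ihd =>
          intro T st hB
          simp only [List.foldl_cons]
          have h1 := BInvD_step grid depth D hg T st f d hB
          have h2 := ihd _ _ h1
          apply BInvD_congr _ _ _ _ _ ?_ h2
          intro f' d'
          simp only [List.mem_cons]
          constructor
          · rintro ((hT | ⟨hf, hd⟩) | ⟨hf, hd⟩)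
            · exact Or.inl hT
            · exact Or.inr ⟨hf, Or.inl hd⟩
            · exact Or.inr ⟨hf, Or.inr hd⟩
          · rintro (hT | ⟨hf, hd | hd⟩)
            · exact Or.inl (Or.inl hT)
            · subst hd; exact Or.inl (Or.inr ⟨hf, rfl⟩)
            · exact Or.inr ⟨hf, hd⟩
      have h1 := inner dirs T st hB
      have h2 := ih _ _ h1
      apply BInvD_congr _ _ _ _ _ ?_ h2
      intro f' d'
      simp only [List.mem_cons]
      constructor
      · rintro ((hT | ⟨hf, hd⟩) | ⟨hf, hd⟩)
        · exact Or.inl hT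
        · exact Or.inr ⟨Or.inl hf, hd⟩
        · exact Or.inr ⟨Or.inr hf, hd⟩
      · rintro (hT | ⟨hf | hf, hd⟩)
        · exact Or.inl (Or.inl hT)
        · subst hf; exact Or.inl (Or.inr ⟨rfl, hd⟩)
        · exact Or.inr ⟨hf, hd⟩
  have h := main F (fun _ _ => False) (m, []) init
  exact BInvD_congr _ _ _ _ _ (fun f d => by simp) h

lemma bAsgnT_iff (dirs : List (Int × Int)) (D : List (List (Option Int))) (k : Int)
    (F : List (Int × Int)) (h3 : pvNbrInv D dirs k)
    (hF : pvFrontEq D k F) (y x : Int) :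
    bAsgnT (fun f d => f ∈ F ∧ d ∈ dirs) D y x ↔ aAsgn dirs D y x := by
  unfold bAsgnT aAsgn
  constructor
  · rintro ⟨hi, hn, f, d, ⟨hfF, hd⟩, hy, hx⟩
    refine ⟨hi, hn, ?_⟩
    rw [condB, List.any_eq_true]
    refine ⟨d, hd, ?_⟩
    have hf : gv D f.1 f.2 = some k := (hF f).mp hfF
    have e1 : y + d.2 = f.1 := by omega
    have e2 : x + d.1 = f.2 := by omega
    rw [e1, e2, hf]
    rfl
  · rintro ⟨hi, hn, hc⟩
    refine ⟨hi, hn, ?_⟩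
    rw [condB, List.any_eq_true] at hc
    rcases hc with ⟨d, hd, hs⟩
    rcases Option.isSome_iff_exists.mp hs with ⟨v, hv⟩
    have hvk : v = k := h3 y x hi hn d hd v hv
    refine ⟨(y + d.2, x + d.1), d, ⟨(hF _).mpr ?_, hd⟩, by omega, by omega⟩
    rw [hv, hvk]

lemma roundB_get (grid : List (List String)) (dirs : List (Int × Int))
    (D : List (List (Option Int))) (k : Int) (hg : pvGridShape grid D)
    (m : PySem.Dict (Int × Int) Int) (hm : pvRel D m) (F : List (Int × Int))
    (h3 : pvNbrInv D dirs k) (hF : pvFrontEq D k F) :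
    pvRel (stepG dirs (k + 1) D) (pvRoundB grid dirs (k + 1) m F).1 := by
  have h := roundB_char grid dirs (k + 1) D hg m hm F
  intro y x
  rw [gv_stepG]
  by_cases hAs : aAsgn dirs D y x
  · rw [if_pos hAs]
    exact (h.2.1 _ _ ((bAsgnT_iff dirs D k F h3 hF _ _).mpr hAs)).symm
  · rw [if_neg hAs]
    exact (h.1 _ _ (fun hc => hAs ((bAsgnT_iff dirs D k F h3 hF _ _).mp hc))).symm

lemma roundB_snd (grid : List (List String)) (dirs : List (Int × Int))
    (D : List (List (Option Int))) (k : Int) (hg : pvGridShape grid D)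
    (m : PySem.Dict (Int × Int) Int) (hm : pvRel D m) (F : List (Int × Int))
    (h3 : pvNbrInv D dirs k) (hF : pvFrontEq D k F) :
    ∀ c : Int × Int, c ∈ (pvRoundB grid dirs (k + 1) m F).2 ↔ aAsgn dirs D c.1 c.2 := by
  intro c
  rw [(roundB_char grid dirs (k + 1) D hg m hm F).2.2 c]
  exact bAsgnT_iff dirs D k F h3 hF _ _

-- ----- invariants survive one level -----

lemma below_stepG (dirs : List (Int × Int)) (D : List (List (Option Int))) (k : Int)
    (hb : pvBelow D (k + 1)) : pvBelow (stepG dirs (k + 1) D) (k + 2) := by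
  intro y x v h
  rw [gv_stepG] at h
  split_ifs at h with hAs
  · have : v = k + 1 := by injection h with h'; omega
    omega
  · have := hb y x v h
    omega

lemma nbrInv_stepG (dirs : List (Int × Int)) (D : List (List (Option Int))) (k : Int)
    (hb : pvBelow D (k + 1)) : pvNbrInv (stepG dirs (k + 1) D) dirs (k + 1) := by
  intro y x hinb hnone d hd v hv
  have hinbD : pvInb D y x := (pvInb_shape D _ y x (stepG_shape dirs (k + 1) D)).mp hinb
  rw [gv_stepG] at hnone hv
  split_ifs at hnone with hAs
  have hnc : ¬ condB D dirs y x = true := fun hc => hAs ⟨hinbD, hnone, hc⟩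
  split_ifs at hv with hAs2
  · exact (Option.some.inj hv).symm
  · exfalso
    apply hnc
    rw [condB, List.any_eq_true]
    exact ⟨d, hd, by rw [hv]; rfl⟩

lemma frontEq_stepG (dirs : List (Int × Int)) (D : List (List (Option Int))) (k : Int)
    (F' : List (Int × Int)) (hb : pvBelow D (k + 1))
    (h : ∀ c : Int × Int, c ∈ F' ↔ aAsgn dirs D c.1 c.2) :
    pvFrontEq (stepG dirs (k + 1) D) (k + 1) F' := by
  intro c
  rw [h c, gv_stepG]
  constructor
  · intro hAs
    rw [if_pos hAs]
  · intro hv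
    split_ifs at hv with hAs
    · exact hAs
    · exfalso
      have := hb c.1 c.2 (k + 1) hv
      omega

lemma stepG_id (dirs : List (Int × Int)) (depth : Int) (D : List (List (Option Int)))
    (h : ¬ ∃ c : Int × Int, aAsgn dirs D c.1 c.2) : stepG dirs depth D = D := by
  apply pvExt D _ D (stepG_shape dirs depth D) (pvShape_refl D)
  intro y x
  rw [gv_stepG, if_neg (fun hAs => h ⟨((y : Int), (x : Int)), hAs⟩)]

-- one-step unfoldings of the two loops
lemma pvLoopA_eq (dirs : List (Int × Int)) (depth : Int) (D : List (List (Option Int))) :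
    pvLoopA dirs depth D =
      if (pvPassA dirs (depth + 1) D).2 then pvLoopA dirs (depth + 1) (pvPassA dirs (depth + 1) D).1
      else (pvPassA dirs (depth + 1) D).1 := by
  rw [pvLoopA]
  split <;> rename_i h <;> simp [h]

lemma pvLoopB_eq (grid : List (List String)) (dirs : List (Int × Int)) (depth : Int)
    (m : PySem.Dict (Int × Int) Int) (F : List (Int × Int)) :
    pvLoopB grid dirs depth m F =
      if F = [] then m
      else pvLoopB grid dirs (depth + 1) (pvRoundB grid dirs (depth + 1) m F).1
        (pvRoundB grid dirs (depth + 1) m F).2 := by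
  rw [pvLoopB]

-- ----- the main induction: A's erosion loop and B's BFS loop stay related -----

lemma loop_rel (grid : List (List String)) (dirs : List (Int × Int)) :
    ∀ (n : Nat) (D : List (List (Option Int))) (m : PySem.Dict (Int × Int) Int)
      (F : List (Int × Int)) (k : Int),
      pvCountNone D ≤ n → pvGridShape grid D → pvRel D m →
      pvBelow D (k + 1) → pvNbrInv D dirs k → pvFrontEq D k F →
      pvRel (pvLoopA dirs k D) (pvLoopB grid dirs k m F) := by
  intro n
  induction n with
  | zero =>
    intro D m F k hn hg hm hb h3 hF
    rw [pvLoopA_eq, pvLoopB_eq]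
    by_cases hE : ∃ c : Int × Int, aAsgn dirs D c.1 c.2
    · exfalso
      have htr : (pvPassA dirs (k + 1) D).2 = true := (passA_snd dirs (k + 1) D hb).mpr hE
      have hlt := (pvPassA_meas dirs (k + 1) D).2.2 htr
      omega
    · have htr : (pvPassA dirs (k + 1) D).2 = false := by
        cases h : (pvPassA dirs (k + 1) D).2
        · rfl
        · exact absurd ((passA_snd dirs (k + 1) D hb).mp h) hE
      rw [if_neg (by simp [htr])]
      rw [passA_fst dirs (k + 1) D hb, stepG_id dirs (k + 1) D hE]
      by_cases hF0 : F = []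
      · rw [if_pos hF0]; exact hm
      · rw [if_neg hF0]
        have hget := roundB_get grid dirs D k hg m hm F h3 hF
        rw [stepG_id dirs (k + 1) D hE] at hget
        have hF'nil : (pvRoundB grid dirs (k + 1) m F).2 = [] := by
          apply List.eq_nil_iff_forall_not_mem.mpr
          intro c hc
          exact hE ⟨c, (roundB_snd grid dirs D k hg m hm F h3 hF c).mp hc⟩
        rw [hF'nil, pvLoopB_eq, if_pos rfl]
        exact hget
  | succ n ih =>
    intro D m F k hn hg hm hb h3 hF
    rw [pvLoopA_eq, pvLoopB_eq]
    by_cases hE : ∃ c : Int × Int, aAsgn dirs D c.1 c.2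
    · have htr : (pvPassA dirs (k + 1) D).2 = true := (passA_snd dirs (k + 1) D hb).mpr hE
      rw [if_pos htr, passA_fst dirs (k + 1) D hb]
      have hFne : F ≠ [] := by
        rcases hE with ⟨c, hc⟩
        rcases List.any_eq_true.mp hc.2.2 with ⟨d, hd, hs⟩
        rcases Option.isSome_iff_exists.mp hs with ⟨v, hv⟩
        have hvk : v = k := h3 c.1 c.2 hc.1 hc.2.1 d hd v hv
        intro h0
        have hmem := (hF (c.1 + d.2, c.2 + d.1)).mpr (by rw [← hvk]; exact hv)
        rw [h0] at hmem
        simp at hmem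
      rw [if_neg hFne]
      have hlt : pvCountNone (stepG dirs (k + 1) D) < pvCountNone D := by
        have h := (pvPassA_meas dirs (k + 1) D).2.2 htr
        rwa [passA_fst dirs (k + 1) D hb] at h
      apply ih _ _ (pvRoundB grid dirs (k + 1) m F).2 (k + 1) (by omega) ?_ ?_ ?_ ?_ ?_
      · exact pvGridShape_of_shape grid D _ hg (stepG_shape dirs (k + 1) D)
      · exact roundB_get grid dirs D k hg m hm F h3 hF
      · intro y x v hv
        have := below_stepG dirs D k hb y x v hv
        omega
      · exact nbrInv_stepG dirs D k hb
      · exact frontEq_stepG dirs D k _ hb (roundB_snd grid dirs D k hg m hm F h3 hF)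
    · have htr : (pvPassA dirs (k + 1) D).2 = false := by
        cases h : (pvPassA dirs (k + 1) D).2
        · rfl
        · exact absurd ((passA_snd dirs (k + 1) D hb).mp h) hE
      rw [if_neg (by simp [htr])]
      rw [passA_fst dirs (k + 1) D hb, stepG_id dirs (k + 1) D hE]
      by_cases hF0 : F = []
      · rw [if_pos hF0]; exact hm
      · rw [if_neg hF0]
        have hget := roundB_get grid dirs D k hg m hm F h3 hF
        rw [stepG_id dirs (k + 1) D hE] at hget
        have hF'nil : (pvRoundB grid dirs (k + 1) m F).2 = [] := by
          apply List.eq_nil_iff_forall_not_mem.mpr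
          intro c hc
          exact hE ⟨c, (roundB_snd grid dirs D k hg m hm F h3 hF c).mp hc⟩
        rw [hF'nil, pvLoopB_eq, if_pos rfl]
        exact hget

-- ----- the initial state: seed characterization -----

lemma gv_init (grid : List (List String)) (y x : Int) (v : Int)
    (h : gv (pvInit grid) y x = some v) : v = 0 := by
  by_cases hinb : pvInb (pvInit grid) y x
  · obtain ⟨h1, h2, h3, h4⟩ := hinb
    rw [gv_pos _ _ _ h1 h2] at h
    have hlen : (pvInit grid).length = grid.length := by simp [pvInit]
    have hy : y.toNat < grid.length := by rw [← hlen]; exact h3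
    have hrow : pvRow (pvInit grid) y.toNat
        = (grid[y.toNat]'hy).map (fun cell => if cell = "#" then none else some (0 : Int)) := by
      unfold pvRow pvInit
      rw [List.getD_eq_getElem _ _ (by simpa [pvInit] using h3), List.getElem_map]
    rw [hrow] at h
    rcases Nat.lt_or_ge x.toNat (grid[y.toNat]'hy).length with hx | hx
    · rw [List.getD_eq_getElem _ _ (by simpa using hx), List.getElem_map] at h
      split_ifs at h
      all_goals first
        | (simp only [Option.some.injEq] at h; omega)
        | exact absurd h (by simp)
    · rw [List.getD_eq_default _ _ (by simpa using hx)] at h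
      simp at h
  · rw [gv_of_not_inb _ _ _ hinb] at h
    simp at h

lemma gv_init_cell (grid : List (List String)) (k j : Nat) (hk : k < grid.length)
    (hj : j < (grid[k]'hk).length) :
    gv (pvInit grid) (k : Int) (j : Int) =
      if (grid[k]'hk)[j]'hj = "#" then none else some 0 := by
  rw [gv_natCast]
  have hrow : pvRow (pvInit grid) k
      = (grid[k]'hk).map (fun cell => if cell = "#" then none else some (0 : Int)) := by
    unfold pvRow pvInit
    rw [List.getD_eq_getElem _ _ (by simpa [pvInit] using hk), List.getElem_map]
  rw [hrow, List.getD_eq_getElem _ _ (by simpa using hj), List.getElem_map]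

lemma pvInb_init (grid : List (List String)) (y x : Int) :
    pvInb (pvInit grid) y x ↔
      (0 ≤ y ∧ 0 ≤ x ∧ y.toNat < grid.length ∧ x.toNat < (grid.getD y.toNat []).length) := by
  unfold pvInb
  have h := pvGridShape_init grid
  rw [h.1, h.2 y.toNat]

-- seed invariant: after processing the cells of S, the dict holds exactly the initial grid
-- restricted to S and the frontier lists the zero cells of S
def SInv (grid : List (List String)) (S : Int × Int → Prop)
    (st : PySem.Dict (Int × Int) Int × List (Int × Int)) : Prop :=
  (∀ y x : Int, ¬ S (y, x) → st.1.get? (y, x) = none) ∧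
  (∀ y x : Int, S (y, x) → st.1.get? (y, x) = gv (pvInit grid) y x) ∧
  (∀ c : Int × Int, c ∈ st.2 ↔ S c ∧ gv (pvInit grid) c.1 c.2 = some 0)

lemma SInv_congr (grid : List (List String)) (S S' : Int × Int → Prop)
    (st : PySem.Dict (Int × Int) Int × List (Int × Int))
    (h : ∀ c, S c ↔ S' c) (hS : SInv grid S st) : SInv grid S' st := by
  obtain ⟨h1, h2, h3⟩ := hS
  refine ⟨?_, ?_, ?_⟩
  · intro y x hn; exact h1 y x (fun hc => hn ((h _).mp hc))
  · intro y x hc; exact h2 y x ((h _).mpr hc)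
  · intro c; rw [h3 c, h c]

lemma SInv_step (grid : List (List String)) (S : Int × Int → Prop)
    (st : PySem.Dict (Int × Int) Int × List (Int × Int)) (k j : Nat)
    (hk : k < grid.length) (hj : j < (grid[k]'hk).length)
    (hS : SInv grid S st) :
    SInv grid (fun c => S c ∨ c = ((k : Int), (j : Int)))
      (if (grid[k]'hk)[j]'hj ≠ "#"
        then (st.1.insert ((k : Int), (j : Int)) 0, st.2 ++ [((k : Int), (j : Int))])
        else st) := by
  obtain ⟨h1, h2, h3⟩ := hS
  have hgv := gv_init_cell grid k j hk hj
  split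
  · rename_i hcell
    rw [if_neg hcell] at hgv
    refine ⟨?_, ?_, ?_⟩
    · intro y x hn
      rw [PySem.Dict.get?_insert, if_neg (fun hpq => hn (Or.inr hpq))]
      exact h1 y x (fun hc => hn (Or.inl hc))
    · rintro y x (hc | hc)
      · rw [PySem.Dict.get?_insert]
        split_ifs with he
        · have hyx : y = (k : Int) ∧ x = (j : Int) := Prod.mk.inj he
          rw [hyx.1, hyx.2, hgv]
        · exact h2 y x hc
      · have hyx : y = (k : Int) ∧ x = (j : Int) := Prod.mk.inj hc
        rw [PySem.Dict.get?_insert, if_pos hc, hyx.1, hyx.2, hgv]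
    · intro c
      rw [List.mem_append, List.mem_singleton, h3 c]
      constructor
      · rintro (⟨hc, hz⟩ | hc)
        · exact ⟨Or.inl hc, hz⟩
        · subst hc
          exact ⟨Or.inr rfl, hgv⟩
      · rintro ⟨hc | hc, hz⟩
        · exact Or.inl ⟨hc, hz⟩
        · exact Or.inr hc
  · rename_i hcell
    rw [not_not] at hcell
    rw [if_pos hcell] at hgv
    refine ⟨?_, ?_, ?_⟩
    · intro y x hn
      exact h1 y x (fun hc => hn (Or.inl hc))
    · rintro y x (hc | hc)
      · exact h2 y x hc
      · obtain ⟨rfl, rfl⟩ := Prod.mk.inj hc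
        by_cases hSc : S ((k : Int), (j : Int))
        · exact h2 _ _ hSc
        · rw [h1 _ _ hSc, hgv]
    · intro c
      rw [h3 c]
      constructor
      · rintro ⟨hc, hz⟩
        exact ⟨Or.inl hc, hz⟩
      · rintro ⟨hc | hc, hz⟩
        · exact ⟨hc, hz⟩
        · exfalso
          have : c.1 = (k : Int) ∧ c.2 = (j : Int) := by
            constructor <;> rw [hc]
          rw [this.1, this.2, hgv] at hz
          simp at hz

lemma SInv_fold_row (grid : List (List String)) (k : Nat) (hk : k < grid.length) :
    ∀ (qs : List (Int × String)) (S : Int × Int → Prop)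
      (st : PySem.Dict (Int × Int) Int × List (Int × Int)),
      (∀ q ∈ qs, ∃ j : Nat, ∃ hj : j < (grid[k]'hk).length, q = ((j : Int), (grid[k]'hk)[j]'hj)) →
      SInv grid S st →
      SInv grid (fun c => S c ∨ ∃ q ∈ qs, c = (((k : Nat) : Int), q.1))
        (qs.foldl (fun acc q =>
          if q.2 ≠ "#" then (acc.1.insert (((k : Nat) : Int), q.1) 0, acc.2 ++ [(((k : Nat) : Int), q.1)])
          else acc) st) := by
  intro qs
  induction qs with
  | nil =>
    intro S st hqs hS
    simp only [List.foldl_nil]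
    exact SInv_congr _ _ _ _ (fun c => by simp) hS
  | cons q qs ih =>
    intro S st hqs hS
    simp only [List.foldl_cons]
    obtain ⟨j, hj, rfl⟩ := hqs q (by simp)
    have h1 := SInv_step grid S st k j hk hj hS
    have h2 := ih _ _ (fun q' hq' => hqs q' (by simp [hq'])) h1
    apply SInv_congr _ _ _ _ ?_ h2
    intro c
    simp only [List.mem_cons]
    constructor
    · rintro ((hc | hc) | ⟨q', hq', hc⟩)
      · exact Or.inl hc
      · exact Or.inr ⟨_, Or.inl rfl, hc⟩
      · exact Or.inr ⟨q', Or.inr hq', hc⟩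
    · rintro (hc | ⟨q', hq' | hq', hc⟩)
      · exact Or.inl (Or.inl hc)
      · subst hq'; exact Or.inl (Or.inr hc)
      · exact Or.inr ⟨q', hq', hc⟩

lemma SInv_fold_grid (grid : List (List String)) :
    ∀ (ps : List (Int × List String)) (S : Int × Int → Prop)
      (st : PySem.Dict (Int × Int) Int × List (Int × Int)),
      (∀ p ∈ ps, ∃ k : Nat, ∃ hk : k < grid.length, p = ((k : Int), grid[k]'hk)) →
      SInv grid S st →
      SInv grid
        (fun c => S c ∨ ∃ p ∈ ps, ∃ q ∈ PySem.List.enumerate p.2 0, c = (p.1, q.1))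
        (ps.foldl (fun acc p =>
          (PySem.List.enumerate p.2 0).foldl (fun acc q =>
            if q.2 ≠ "#" then (acc.1.insert (p.1, q.1) 0, acc.2 ++ [(p.1, q.1)])
            else acc) acc) st) := by
  intro ps
  induction ps with
  | nil =>
    intro S st hps hS
    simp only [List.foldl_nil]
    exact SInv_congr _ _ _ _ (fun c => by simp) hS
  | cons p ps ih =>
    intro S st hps hS
    simp only [List.foldl_cons]
    obtain ⟨k, hk, rfl⟩ := hps p (by simp)
    have hq : ∀ q ∈ PySem.List.enumerate (grid[k]'hk) 0,
        ∃ j : Nat, ∃ hj : j < (grid[k]'hk).length, q = ((j : Int), (grid[k]'hk)[j]'hj) := by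
      intro q hqmem
      rw [PySem.List.mem_enumerate_iff] at hqmem
      obtain ⟨j, hj, rfl⟩ := hqmem
      exact ⟨j, hj, by simp⟩
    have h1 := SInv_fold_row grid k hk (PySem.List.enumerate (grid[k]'hk) 0) S st hq hS
    have h2 := ih _ _ (fun p' hp' => hps p' (by simp [hp'])) h1
    apply SInv_congr _ _ _ _ ?_ h2
    intro c
    simp only [List.mem_cons]
    constructor
    · rintro ((hc | ⟨q, hqm, hc⟩) | ⟨p', hp', q, hqm, hc⟩)
      · exact Or.inl hc
      · exact Or.inr ⟨_, Or.inl rfl, q, hqm, hc⟩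
      · exact Or.inr ⟨p', Or.inr hp', q, hqm, hc⟩
    · rintro (hc | ⟨p', hp' | hp', q, hqm, hc⟩)
      · exact Or.inl (Or.inl hc)
      · subst hp'; exact Or.inl (Or.inr ⟨q, hqm, hc⟩)
      · exact Or.inr ⟨p', hp', q, hqm, hc⟩

lemma seedB_char (grid : List (List String)) :
    pvRel (pvInit grid) (pvSeedB grid).1 ∧ pvFrontEq (pvInit grid) 0 (pvSeedB grid).2 := by
  unfold pvSeedB
  have hps : ∀ p ∈ PySem.List.enumerate grid 0,
      ∃ k : Nat, ∃ hk : k < grid.length, p = ((k : Int), grid[k]'hk) := by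
    intro p hp
    rw [PySem.List.mem_enumerate_iff] at hp
    obtain ⟨k, hk, rfl⟩ := hp
    exact ⟨k, hk, by simp⟩
  have hinit : SInv grid (fun _ => False) (PySem.Dict.empty, ([] : List (Int × Int))) := by
    refine ⟨fun y x _ => by simp [PySem.Dict.get?_empty], fun y x h => h.elim, ?_⟩
    intro c
    simp
  have h := SInv_fold_grid grid (PySem.List.enumerate grid 0) (fun _ => False)
    (PySem.Dict.empty, []) hps hinit
  have hfull : ∀ c : Int × Int,
      ((fun c => False ∨ ∃ p ∈ PySem.List.enumerate grid 0,
        ∃ q ∈ PySem.List.enumerate p.2 0, c = (p.1, q.1)) c) ↔ pvInb (pvInit grid) c.1 c.2 := by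
    intro c
    simp only [false_or]
    rw [pvInb_init]
    constructor
    · rintro ⟨p, hp, q, hq, rfl⟩
      obtain ⟨k, hk, rfl⟩ := hps p hp
      rw [PySem.List.mem_enumerate_iff] at hq
      obtain ⟨j, hj, rfl⟩ := hq
      simp only [zero_add]
      refine ⟨by omega, by omega, by simpa using hk, ?_⟩
      rw [Int.toNat_natCast, Int.toNat_natCast, List.getD_eq_getElem _ _ hk]
      simpa using hj
    · rintro ⟨h1, h2, h3, h4⟩
      rw [List.getD_eq_getElem _ _ h3] at h4
      refine ⟨((c.1.toNat : Int), grid[c.1.toNat]'h3), ?_,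
        ((c.2.toNat : Int), (grid[c.1.toNat]'h3)[c.2.toNat]'h4), ?_, ?_⟩
      · rw [PySem.List.mem_enumerate_iff]
        exact ⟨c.1.toNat, h3, by simp⟩
      · rw [PySem.List.mem_enumerate_iff]
        exact ⟨c.2.toNat, h4, by simp⟩
      · simp only
        have e1 : ((c.1.toNat : Nat) : Int) = c.1 := by omega
        have e2 : ((c.2.toNat : Nat) : Int) = c.2 := by omega
        rw [e1, e2]
  have hfin := SInv_congr grid _ _ _ hfull h
  obtain ⟨h1, h2, h3⟩ := hfin
  constructor
  · intro y x
    by_cases hinb : pvInb (pvInit grid) y x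
    · exact (h2 y x hinb).symm
    · rw [h1 y x hinb, gv_of_not_inb _ _ _ hinb]
  · intro c
    rw [h3 c]
    constructor
    · rintro ⟨_, hz⟩; exact hz
    · intro hz
      refine ⟨?_, hz⟩
      by_contra hinb
      rw [gv_of_not_inb _ _ _ hinb] at hz
      simp at hz

-- shape of A's final grid (for the reconstruction of B's output)
lemma pvShape_trans (D E G : List (List (Option Int))) (h1 : pvShape D E) (h2 : pvShape E G) :
    pvShape D G := ⟨by rw [h2.1, h1.1], fun i => by rw [h2.2 i, h1.2 i]⟩

lemma pvLoopA_shape (dirs : List (Int × Int)) :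
    ∀ (n : Nat) (D : List (List (Option Int))) (k : Int), pvCountNone D ≤ n →
      pvShape D (pvLoopA dirs k D) := by
  intro n
  induction n with
  | zero =>
    intro D k hn
    rw [pvLoopA_eq]
    have hmeas := pvPassA_meas dirs (k + 1) D
    split_ifs with h
    · exfalso
      have := hmeas.2.2 h
      omega
    · exact hmeas.1
  | succ n ih =>
    intro D k hn
    rw [pvLoopA_eq]
    have hmeas := pvPassA_meas dirs (k + 1) D
    split_ifs with h
    · have hlt := hmeas.2.2 h
      exact pvShape_trans _ _ _ hmeas.1 (ih _ (k + 1) (by omega))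
    · exact hmeas.1

-- reading every cell back out of the dict rebuilds the related grid
lemma build_eq (grid : List (List String)) (D : List (List (Option Int)))
    (m : PySem.Dict (Int × Int) Int) (hg : pvGridShape grid D) (hm : pvRel D m) :
    (PySem.List.enumerate grid 0).map (fun p =>
      (PySem.List.enumerate p.2 0).map (fun q => m.get? (p.1, q.1))) = D := by
  apply List.ext_getElem
  · rw [List.length_map, PySem.List.length_enumerate, hg.1]
  · intro y hy1 hy2
    rw [List.getElem_map, PySem.List.getElem_enumerate]
    have hyg : y < grid.length := by
      rw [List.length_map, PySem.List.length_enumerate] at hy1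
      exact hy1
    have hrowD : pvRow D y = D[y]'hy2 := List.getD_eq_getElem _ _ hy2
    apply List.ext_getElem
    · rw [List.length_map, PySem.List.length_enumerate, ← hrowD, hg.2 y,
        List.getD_eq_getElem _ _ hyg]
    · intro x hx1 hx2
      rw [List.getElem_map, PySem.List.getElem_enumerate]
      have := hm ((y : Nat) : Int) ((x : Nat) : Int)
      rw [gv_natCast, hrowD, List.getD_eq_getElem _ _ hx2] at this
      simpa using this.symm

-- ===== VERDICT (by name: the statement is the Claim_ definition above) =====
theorem calc_depths_spec : Claim_equal_calc_depths := by
  intro grid dirs _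
  unfold Spec_calc_depths calc_depths calc_depths_alt
  simp only
  obtain ⟨hrel0, hfront0⟩ := seedB_char grid
  have hb0 : pvBelow (pvInit grid) (0 + 1) := by
    intro y x v h
    have := gv_init grid y x v h
    omega
  have hnbr0 : pvNbrInv (pvInit grid) dirs 0 := by
    intro y x _ _ d _ v hv
    exact gv_init grid _ _ v hv
  have hrel := loop_rel grid dirs (pvCountNone (pvInit grid)) (pvInit grid)
    (pvSeedB grid).1 (pvSeedB grid).2 0 (le_refl _) (pvGridShape_init grid) hrel0 hb0 hnbr0 hfront0
  have hshape : pvGridShape grid (pvLoopA dirs 0 (pvInit grid)) :=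
    pvGridShape_of_shape grid _ _ (pvGridShape_init grid)
      (pvLoopA_shape dirs (pvCountNone (pvInit grid)) (pvInit grid) 0 (le_refl _))
  exact (build_eq grid (pvLoopA dirs 0 (pvInit grid))
    (pvLoopB grid dirs 0 (pvSeedB grid).1 (pvSeedB grid).2) hshape hrel).symm
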